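-- pv_equiv track=rewrite | github.com/SheinbergLab/essfile | src/essfile/em.py | _parse_tcl_dict
-- ===== SOURCE A (Python) =====
-- def _parse_tcl_dict(s):
--     """
--     Parse a simple Tcl dict string into a Python dict.
--
--     Handles space-separated key-value pairs where values may be
--     brace-quoted. This is not a full Tcl parser but handles the
--     common calibration dict format.
--     """
--     result = {}
--     s = s.strip()
--     if not s:
--         return result
--
--     i = 0
--     tokens = []
--
--     while i < len(s):
--         # Skip whitespace
--         while i < len(s) and s[i] in ' \t\n':
--             i += 1
--         if i >= len(s):
--             break
--
--         # Brace-quoted value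
--         if s[i] == '{':
--             depth = 1
--             i += 1
--             start = i
--             while i < len(s) and depth > 0:
--                 if s[i] == '{':
--                     depth += 1
--                 elif s[i] == '}':
--                     depth -= 1
--                 i += 1
--             tokens.append(s[start:i-1])
--         else:
--             # Unquoted word
--             start = i
--             while i < len(s) and s[i] not in ' \t\n':
--                 i += 1
--             tokens.append(s[start:i])
--
--     # Pair up as key-value
--     for j in range(0, len(tokens) - 1, 2):
--         result[tokens[j]] = tokens[j + 1]
--
--     return result
-- ===== SOURCE B (Python) =====
-- def _read_token(s):
--     """Skip leading ' \\t\\n', then read one token; return (token, rest) or (None, rest)."""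
--     i = 0
--     while i < len(s) and s[i] in ' \t\n':
--         i += 1
--     s = s[i:]
--     if not s:
--         return None, s
--     if s[0] == '{':
--         depth, i = 1, 1
--         while i < len(s) and depth > 0:
--             if s[i] == '{':
--                 depth += 1
--             elif s[i] == '}':
--                 depth -= 1
--             i += 1
--         return s[1:i - 1], s[i:]
--     i = 0
--     while i < len(s) and s[i] not in ' \t\n':
--         i += 1
--     return s[:i], s[i:]
--
--
-- def _parse_tcl_dict(s):
--     result = {}
--     rest = s.strip()
--     while True:
--         key, rest = _read_token(rest)
--         if key is None:
--             return result
--         value, rest = _read_token(rest)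
--         if value is None:
--             return result
--         result[key] = value
-- ===== Notes on version B (the rewrite author's own statement) =====
-- stated objective: alternative
-- what changed: Replaces the collect-all-tokens-then-pair-by-index phases with a single fused loop around a read_token helper that returns (token, remaining suffix), storing each key-value pair as soon as both tokens are read and dropping a trailing unpaired key naturally.
import Mathlib
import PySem

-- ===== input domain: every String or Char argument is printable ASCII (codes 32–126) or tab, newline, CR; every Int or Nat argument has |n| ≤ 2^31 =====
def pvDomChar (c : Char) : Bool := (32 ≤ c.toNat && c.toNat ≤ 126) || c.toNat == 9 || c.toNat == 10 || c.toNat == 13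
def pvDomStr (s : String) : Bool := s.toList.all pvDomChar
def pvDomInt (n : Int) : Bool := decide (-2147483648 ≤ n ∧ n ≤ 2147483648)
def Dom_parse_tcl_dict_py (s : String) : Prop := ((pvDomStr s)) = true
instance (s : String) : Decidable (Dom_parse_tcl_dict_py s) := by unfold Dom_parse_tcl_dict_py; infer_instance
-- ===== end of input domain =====

-- B fuses A's tokenize-then-pair phases into one loop around a read_token helper returning (token, remaining suffix); alternative decomposition, same cost.


-- ===== PORT A =====
-- s[i] in ' \t\n'
def wsA (c : Char) : Bool := c = ' ' || c = '\t' || c = '\n'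

-- depth update for one character of the brace loop
def stepA (c : Char) (d : Int) : Int := if c = '{' then d + 1 else if c = '}' then d - 1 else d

-- the loops below carry an explicit fuel argument only to make the index
-- recursion structural; callers pass cs.length, which the loops never exhaust.

-- inner loop: while i < len(s) and s[i] in ' \t\n': i += 1
def skipWsA (cs : List Char) (i : Nat) : Nat → Nat
  | 0 => i
  | fuel + 1 =>
    if h : i < cs.length then
      if wsA cs[i] then skipWsA cs (i + 1) fuel else i
    else i

-- brace loop: while i < len(s) and depth > 0: …; i += 1   (returns the final i)
def braceA (cs : List Char) (i : Nat) (depth : Int) : Nat → Nat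
  | 0 => i
  | fuel + 1 =>
    if h : i < cs.length then
      if depth > 0 then braceA cs (i + 1) (stepA cs[i] depth) fuel else i
    else i

-- word loop: while i < len(s) and s[i] not in ' \t\n': i += 1
def wordA (cs : List Char) (i : Nat) : Nat → Nat
  | 0 => i
  | fuel + 1 =>
    if h : i < cs.length then
      if wsA cs[i] then i else wordA cs (i + 1) fuel
    else i

-- outer while loop, collecting tokens (acc = tokens list so far); s[start:j] as drop/take
def tokenizeA (cs : List Char) (i : Nat) (acc : List (List Char)) : Nat → List (List Char)
  | 0 => acc
  | fuel + 1 =>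
    if hi : i < cs.length then
      if h1 : skipWsA cs i cs.length < cs.length then
        if cs[skipWsA cs i cs.length] = '{' then
          tokenizeA cs (braceA cs (skipWsA cs i cs.length + 1) 1 cs.length)
            (acc ++ [(cs.drop (skipWsA cs i cs.length + 1)).take
                       (braceA cs (skipWsA cs i cs.length + 1) 1 cs.length - 1 -
                          (skipWsA cs i cs.length + 1))]) fuel
        else
          tokenizeA cs (wordA cs (skipWsA cs i cs.length) cs.length)
            (acc ++ [(cs.drop (skipWsA cs i cs.length)).take
                       (wordA cs (skipWsA cs i cs.length) cs.length - skipWsA cs i cs.length)]) fuel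
      else acc
    else acc

-- for j in range(0, len(tokens) - 1, 2): result[tokens[j]] = tokens[j + 1]
def pairA : List (List Char) → PySem.Dict String String → PySem.Dict String String
  | k :: v :: rest, d => pairA rest (d.insert (String.ofList k) (String.ofList v))
  | _, d => d

def parse_tcl_dict_py (s : String) : List (String × String) :=
  let cs := (PySem.Str.strip s).toList
  if cs.isEmpty then []
  else (pairA (tokenizeA cs 0 [] cs.length) PySem.Dict.empty).items

-- ===== PORT B =====
def wsB (c : Char) : Bool := c = ' ' || c = '\t' || c = '\n'

def stepB (c : Char) (d : Int) : Int := if c = '{' then d + 1 else if c = '}' then d - 1 else d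

-- the leading-whitespace skip of _read_token (lstrip over the suffix)
def skipB : List Char → List Char
  | c :: r => if wsB c then skipB r else c :: r
  | [] => []

-- the brace-depth loop of _read_token: returns (s[1:i-1], s[i:])
def braceB (d : Int) : List Char → List Char × List Char
  | c :: r =>
    let d' := stepB c d
    if d' = 0 then ([], r)
    else
      match r with
      | [] => ([], [])            -- unterminated brace: s[1:i-1] excludes the last char
      | _ :: _ => let p := braceB d' r; (c :: p.1, p.2)
  | [] => ([], [])

-- the unquoted-word loop of _read_token: returns (s[:i], s[i:])
def wordB : List Char → List Char × List Char
  | c :: r => if wsB c then ([], c :: r) else let p := wordB r; (c :: p.1, p.2)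
  | [] => ([], [])

-- _read_token(s) -> (token or None, rest)
def readTokenB (cs : List Char) : Option (List Char) × List Char :=
  match skipB cs with
  | [] => (none, [])
  | c :: r =>
    if c = '{' then let p := braceB 1 r; (some p.1, p.2)
    else let p := wordB (c :: r); (some p.1, p.2)

-- the while True loop of _parse_tcl_dict; fuel only makes the recursion on the
-- shrinking suffix structural (callers pass the suffix length, never exhausted)
def loopB : List Char → PySem.Dict String String → Nat → PySem.Dict String String
  | _, d, 0 => d
  | cs, d, fuel + 1 =>
    match readTokenB cs with
    | (none, _) => d
    | (some k, r1) =>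
      match readTokenB r1 with
      | (none, _) => d
      | (some v, r2) => loopB r2 (d.insert (String.ofList k) (String.ofList v)) fuel

def parse_tcl_dict_py_alt (s : String) : List (String × String) :=
  (loopB (PySem.Str.strip s).toList PySem.Dict.empty (PySem.Str.strip s).toList.length).items

-- ===== PRECONDITION & SPEC =====
def Spec_parse_tcl_dict_py (s : String) (out : List (String × String)) : Prop := out = parse_tcl_dict_py_alt s
instance (s : String) (out : List (String × String)) : Decidable (Spec_parse_tcl_dict_py s out) := by unfold Spec_parse_tcl_dict_py; infer_instance

-- ===== CLAIM (what is proved, stated in full; the proofs are below) =====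
def Claim_equal_parse_tcl_dict_py : Prop := ∀ (s : String), Dom_parse_tcl_dict_py s → Spec_parse_tcl_dict_py s (parse_tcl_dict_py s)

-- ===== LEMMAS AND PROOFS =====

theorem skipWsA_ge (cs : List Char) (i : Nat) (f : Nat) : i ≤ skipWsA cs i f := by
  induction f generalizing i with
  | zero => simp [skipWsA]
  | succ f ih =>
    rw [skipWsA]
    split
    · split
      · exact le_trans (by omega) (ih (i + 1))
      · omega
    · omega

theorem skipWsA_not_ws (cs : List Char) (i f : Nat) (hf : cs.length ≤ i + f)
    (h : skipWsA cs i f < cs.length) : wsA cs[skipWsA cs i f] = false := by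
  fun_induction skipWsA cs i f with
  | case1 i => omega
  | case2 i f h1 hws ih => exact ih (by omega) h
  | case3 i f h1 hws => simpa using hws
  | case4 i f h1 => omega

theorem braceA_ge (cs : List Char) (i : Nat) (d : Int) (f : Nat) : i ≤ braceA cs i d f := by
  induction f generalizing i d with
  | zero => simp [braceA]
  | succ f ih =>
    rw [braceA]
    split
    · split
      · exact le_trans (by omega) (ih (i + 1) _)
      · omega
    · omega

theorem braceA_off (cs : List Char) (i : Nat) (d : Int) (f : Nat) (h : cs.length ≤ i) :
    braceA cs i d f = i := by
  cases f with
  | zero => rfl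
  | succ f => rw [braceA, dif_neg (by omega)]

theorem braceA_zero (cs : List Char) (i : Nat) (f : Nat) : braceA cs i 0 f = i := by
  cases f with
  | zero => rfl
  | succ f =>
    rw [braceA]
    split
    · simp
    · rfl

theorem braceA_lt (cs : List Char) (i : Nat) (d : Int) (f : Nat) (h : i < cs.length)
    (hd : 0 < d) (hf : 1 ≤ f) : i + 1 ≤ braceA cs i d f := by
  cases f with
  | zero => omega
  | succ f =>
    rw [braceA, dif_pos h, if_pos hd]
    exact braceA_ge cs (i + 1) _ f

theorem wordA_ge (cs : List Char) (i : Nat) (f : Nat) : i ≤ wordA cs i f := by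
  induction f generalizing i with
  | zero => simp [wordA]
  | succ f ih =>
    rw [wordA]
    split
    · split
      · omega
      · exact le_trans (by omega) (ih (i + 1))
    · omega

theorem wordA_lt (cs : List Char) (i : Nat) (f : Nat) (h : i < cs.length)
    (hw : wsA cs[i] = false) (hf : 1 ≤ f) : i + 1 ≤ wordA cs i f := by
  cases f with
  | zero => omega
  | succ f =>
    rw [wordA, dif_pos h, if_neg (by simp [hw])]
    exact wordA_ge cs (i + 1) f

theorem skipB_len (cs : List Char) : (skipB cs).length ≤ cs.length := by
  induction cs with
  | nil => simp [skipB]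
  | cons c r ih =>
    simp only [skipB]
    split
    · simp; omega
    · simp

theorem skipB_head_not_ws (cs : List Char) (c : Char) (r : List Char)
    (h : skipB cs = c :: r) : wsB c = false := by
  induction cs with
  | nil => simp [skipB] at h
  | cons a t ih =>
    simp only [skipB] at h
    split at h
    · exact ih h
    · cases h; simpa using ‹¬ wsB c = true›

theorem braceB_snd_len (d : Int) (cs : List Char) : (braceB d cs).2.length ≤ cs.length := by
  induction cs generalizing d with
  | nil => simp [braceB]
  | cons c r ih =>
    rw [braceB.eq_def]
    simp only []
    split
    · simp
    · cases r with
      | nil => simp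
      | cons b t =>
        have := ih (d := stepB c d)
        simp only [List.length_cons] at this ⊢
        omega

theorem wordB_snd_len (cs : List Char) : (wordB cs).2.length ≤ cs.length := by
  induction cs with
  | nil => simp [wordB]
  | cons c r ih =>
    simp only [wordB]
    split
    · simp
    · simp; omega

theorem readTokenB_some_lt (cs : List Char) (k : List Char) (r : List Char)
    (h : readTokenB cs = (some k, r)) : r.length < cs.length := by
  unfold readTokenB at h
  cases hs : skipB cs with
  | nil => rw [hs] at h; simp at h
  | cons c t =>
    rw [hs] at h
    simp only [] at h
    have hlen : t.length + 1 ≤ cs.length := by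
      have := skipB_len cs; rw [hs] at this; simpa using this
    have hws : wsB c = false := skipB_head_not_ws cs c t hs
    by_cases hc : c = '{'
    · rw [if_pos hc] at h
      have := braceB_snd_len 1 t
      cases h; omega
    · rw [if_neg hc] at h
      simp only [wordB, hws, Bool.false_eq_true, if_neg, not_false_iff] at h
      have := wordB_snd_len t
      cases h; omega

-- token stream produced by repeatedly calling readTokenB (proof-side mediator)
def tokensB (cs : List Char) : List (List Char) :=
  match h : readTokenB cs with
  | (none, _) => []
  | (some k, r) => k :: tokensB r
termination_by cs.length
decreasing_by exact readTokenB_some_lt cs k r h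

theorem tokensB_none (cs : List Char) (r : List Char) (h : readTokenB cs = (none, r)) :
    tokensB cs = [] := by
  rw [tokensB]; split
  · rfl
  · rename_i k r' heq; rw [h] at heq; exact absurd heq (by simp)

theorem tokensB_some (cs : List Char) (k : List Char) (r : List Char)
    (h : readTokenB cs = (some k, r)) : tokensB cs = k :: tokensB r := by
  rw [tokensB]; split
  · rename_i heq; rw [h] at heq; exact absurd heq (by simp)
  · rename_i k' r' heq; rw [h] at heq; cases heq; rfl

theorem loopB_eq_pairA (f : Nat) (cs : List Char) (d : PySem.Dict String String)
    (hf : cs.length ≤ f) : loopB cs d f = pairA (tokensB cs) d := by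
  induction f generalizing cs d with
  | zero =>
    have : cs = [] := by cases cs <;> simp_all
    subst this
    rw [tokensB_none [] [] rfl]
    rfl
  | succ f ih =>
    rw [loopB]
    cases h1 : readTokenB cs with
    | mk o1 r1 =>
      cases o1 with
      | none => rw [tokensB_none _ _ h1]; rfl
      | some k =>
        simp only []
        cases h2 : readTokenB r1 with
        | mk o2 r2 =>
          cases o2 with
          | none =>
            rw [tokensB_some _ _ _ h1, tokensB_none _ _ h2]
            rfl
          | some v =>
            simp only []
            rw [tokensB_some _ _ _ h1, tokensB_some _ _ _ h2]
            have a1 := readTokenB_some_lt cs k r1 h1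
            have a2 := readTokenB_some_lt r1 v r2 h2
            exact ih r2 _ (by omega)

theorem skip_bridge (f : Nat) (cs : List Char) (i : Nat) (hf : cs.length ≤ i + f) :
    skipB (cs.drop i) = cs.drop (skipWsA cs i f) := by
  induction f generalizing i with
  | zero =>
    rw [skipWsA, List.drop_eq_nil_of_le (by omega)]
    rfl
  | succ f ih =>
    rw [skipWsA]
    split
    · rename_i h
      by_cases hws : wsA cs[i] = true
      · rw [if_pos hws, List.drop_eq_getElem_cons h, skipB,
            if_pos (show wsB cs[i] = true from hws)]
        exact ih (i + 1) (by omega)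
      · rw [if_neg hws, List.drop_eq_getElem_cons h, skipB,
            if_neg (show ¬ wsB cs[i] = true from hws), ← List.drop_eq_getElem_cons h]
    · rw [List.drop_eq_nil_of_le (by omega)]
      rfl

theorem word_bridge (f : Nat) (cs : List Char) (i : Nat) (hf : cs.length ≤ i + f) :
    wordB (cs.drop i) = ((cs.drop i).take (wordA cs i f - i), cs.drop (wordA cs i f)) := by
  induction f generalizing i with
  | zero =>
    rw [wordA, List.drop_eq_nil_of_le (by omega)]
    simp [wordB]
  | succ f ih =>
    rw [wordA]
    split
    · rename_i h
      by_cases hws : wsA cs[i] = true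
      · rw [if_pos hws, List.drop_eq_getElem_cons h, wordB,
            if_pos (show wsB cs[i] = true from hws)]
        simp
      · have hge := wordA_ge cs (i + 1) f
        rw [if_neg hws, List.drop_eq_getElem_cons h, wordB,
            if_neg (show ¬ wsB cs[i] = true from hws), ih (i + 1) (by omega)]
        have hta : wordA cs (i + 1) f - i = (wordA cs (i + 1) f - (i + 1)) + 1 := by omega
        rw [hta, List.take_succ_cons]
    · rw [List.drop_eq_nil_of_le (by omega)]
      simp [wordB]

theorem brace_bridge (f : Nat) (cs : List Char) (i : Nat) (d : Int) (hd : 0 < d)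
    (hf : cs.length ≤ i + f) :
    braceB d (cs.drop i) =
      ((cs.drop i).take (braceA cs i d f - 1 - i), cs.drop (braceA cs i d f)) := by
  fun_induction braceA cs i d f with
  | case1 i d =>
    rw [List.drop_eq_nil_of_le (by omega)]
    simp [braceB]
  | case2 i d f h hdp ih =>
    rw [List.drop_eq_getElem_cons h, braceB.eq_def]
    have hstep : stepB cs[i] d = stepA cs[i] d := rfl
    simp only [hstep]
    by_cases hz : stepA cs[i] d = 0
    · rw [if_pos hz, hz, braceA_zero]
      simp
    · rw [if_neg hz]
      have hdp' : 0 < stepA cs[i] d := by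
        unfold stepA at hz ⊢; split_ifs at hz ⊢ <;> omega
      cases hr : cs.drop (i + 1) with
      | nil =>
        have hlen : cs.length ≤ i + 1 := by
          have := congrArg List.length hr; simp at this; omega
        rw [braceA_off cs (i + 1) _ f hlen, List.drop_eq_nil_of_le hlen]
        have h0 : i + 1 - 1 - i = 0 := by omega
        rw [h0]
        rfl
      | cons b t =>
        have hlen2 : i + 1 < cs.length := by
          by_contra hc
          have : cs.drop (i + 1) = [] := List.drop_eq_nil_of_le (by omega)
          rw [hr] at this; exact absurd this (by simp)
        have hdx := ih hdp' (by omega)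
        rw [hr] at hdx
        have hadv : i + 2 ≤ braceA cs (i + 1) (stepA cs[i] d) f :=
          braceA_lt cs (i + 1) _ f hlen2 hdp' (by omega)
        rw [hdx]
        have hta : braceA cs (i + 1) (stepA cs[i] d) f - 1 - i =
            (braceA cs (i + 1) (stepA cs[i] d) f - 1 - (i + 1)) + 1 := by omega
        rw [hta, List.take_succ_cons]
  | case3 i d f h hdp => omega
  | case4 i d f h =>
    rw [List.drop_eq_nil_of_le (by omega)]
    simp [braceB]

theorem tokens_bridge (f : Nat) (cs : List Char) (i : Nat) (acc : List (List Char))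
    (hf : cs.length ≤ i + f) :
    tokenizeA cs i acc f = acc ++ tokensB (cs.drop i) := by
  induction f generalizing i acc with
  | zero =>
    rw [tokenizeA, List.drop_eq_nil_of_le (by omega), tokensB_none [] [] rfl]
    simp
  | succ f ih =>
    rw [tokenizeA]
    split
    · rename_i hi
      split
      · rename_i h1
        have hsb : skipB (cs.drop i) = cs.drop (skipWsA cs i cs.length) :=
          skip_bridge cs.length cs i (by omega)
        split
        · rename_i hbr
          have hread : readTokenB (cs.drop i) =
              (some ((cs.drop (skipWsA cs i cs.length + 1)).take
                       (braceA cs (skipWsA cs i cs.length + 1) 1 cs.length - 1 -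
                          (skipWsA cs i cs.length + 1))),
               cs.drop (braceA cs (skipWsA cs i cs.length + 1) 1 cs.length)) := by
            unfold readTokenB
            rw [hsb, List.drop_eq_getElem_cons h1]
            simp only []
            rw [if_pos hbr, brace_bridge cs.length cs (skipWsA cs i cs.length + 1) 1
                  (by omega) (by omega)]
          have hge := skipWsA_ge cs i cs.length
          have hadv := braceA_ge cs (skipWsA cs i cs.length + 1) 1 cs.length
          rw [ih _ _ (by omega), tokensB_some _ _ _ hread]
          simp
        · rename_i hbr
          have hws : wsA cs[skipWsA cs i cs.length] = false :=
            skipWsA_not_ws cs i cs.length (by omega) h1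
          have hread : readTokenB (cs.drop i) =
              (some ((cs.drop (skipWsA cs i cs.length)).take
                       (wordA cs (skipWsA cs i cs.length) cs.length - skipWsA cs i cs.length)),
               cs.drop (wordA cs (skipWsA cs i cs.length) cs.length)) := by
            unfold readTokenB
            rw [hsb, List.drop_eq_getElem_cons h1]
            simp only []
            rw [if_neg hbr, ← List.drop_eq_getElem_cons h1,
                word_bridge cs.length cs (skipWsA cs i cs.length) (by omega)]
          have hge := skipWsA_ge cs i cs.length
          have hadv := wordA_lt cs (skipWsA cs i cs.length) cs.length h1 hws (by omega)
          rw [ih _ _ (by omega), tokensB_some _ _ _ hread]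
          simp
      · rename_i h1
        have hread : readTokenB (cs.drop i) = (none, []) := by
          unfold readTokenB
          rw [skip_bridge cs.length cs i (by omega), List.drop_eq_nil_of_le (by omega)]
        rw [tokensB_none _ _ hread]
        simp
    · rename_i hi
      have hread : readTokenB (cs.drop i) = (none, []) := by
        unfold readTokenB
        rw [List.drop_eq_nil_of_le (by omega)]
        rfl
      rw [tokensB_none _ _ hread]
      simp

-- ===== VERDICT (by name: the statement is the Claim_ definition above) =====
theorem parse_tcl_dict_py_spec : Claim_equal_parse_tcl_dict_py := by
  intro s _
  unfold Spec_parse_tcl_dict_py parse_tcl_dict_py parse_tcl_dict_py_alt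
  set cs := (PySem.Str.strip s).toList with hcs
  by_cases h : cs.isEmpty
  · rw [if_pos h]
    rw [List.isEmpty_iff] at h
    rw [h]
    rfl
  · rw [if_neg h]
    rw [loopB_eq_pairA cs.length cs PySem.Dict.empty (le_refl _)]

    have := tokens_bridge cs.length cs 0 [] (by omega)
    simp only [List.drop_zero, List.nil_append] at this
    rw [this]
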